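-- pv_equiv track=rewrite | github.com/yvan674/dgx_tools | dgxtools/container_inspect.py | get_user
-- ===== SOURCE A (Python) =====
-- def get_user(mounts):
--     """Gets user ID from the Mount source
--
--     :param list mounts: The 'Mounts' value from docker inspect.
--     :return: User ID.
--     :rtype: str
--     """
--     mount = []
--     for i, x in enumerate(mounts):
--         mount.append(x['Source'].split('/'))
--         if not mount[i][0]:
--             del mount[i][0]
--
--     # We assume that the 2nd value of the mount is the user. We check by making
--     # sure that the first and the second values are cluster and [home | data]
--     # We also assume the last mount is the correct one.
--     for m in mount:
--         try:
--             if m[0] == 'cluster' and (m[1] == 'data' or m[1] == 'home'):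
--                 return m[2]
--             else:
--                 continue
--         except IndexError:
--             continue
--
--     # If we've gone through everything and still haven't found the user:
--     return "Unknown"
-- ===== SOURCE B (Python) =====
-- def get_user(mounts):
--     """Gets user ID from the Mount source
--
--     :param list mounts: The 'Mounts' value from docker inspect.
--     :return: User ID.
--     :rtype: str
--     """
--     for x in mounts:
--         s = x['Source']
--         if s.startswith('/'):
--             s = s[1:]
--         if s.startswith('cluster/data/') or s.startswith('cluster/home/'):
--             rest = s[13:]
--             i = rest.find('/')
--             return rest if i < 0 else rest[:i]
--     return "Unknown"
-- ===== Notes on version B (the rewrite author's own statement) =====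
-- stated objective: alternative
-- what changed: B never splits any path: it strips one leading '/', tests the literal prefixes 'cluster/data/' and 'cluster/home/' directly on the string, and cuts the user id out with find('/'), whereas A splits every source on '/' into an intermediate list of lists and then scans that with try/except IndexError.
import Mathlib
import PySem

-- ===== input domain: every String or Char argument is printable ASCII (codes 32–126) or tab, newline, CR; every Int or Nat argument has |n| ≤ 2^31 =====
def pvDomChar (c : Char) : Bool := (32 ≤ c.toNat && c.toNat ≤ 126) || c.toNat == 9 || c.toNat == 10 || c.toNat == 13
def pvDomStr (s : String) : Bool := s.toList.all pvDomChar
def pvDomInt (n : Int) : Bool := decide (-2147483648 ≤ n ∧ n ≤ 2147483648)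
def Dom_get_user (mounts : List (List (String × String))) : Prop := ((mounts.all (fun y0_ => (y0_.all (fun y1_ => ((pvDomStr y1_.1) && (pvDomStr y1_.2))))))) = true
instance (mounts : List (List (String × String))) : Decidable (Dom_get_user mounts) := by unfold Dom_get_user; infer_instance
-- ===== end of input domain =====

-- B replaces A's split-every-source-then-scan with direct string prefix matching
-- ("cluster/data/" / "cluster/home/") and a find-based cut: no split lists are built (objective: alternative).

-- ===== PORT A =====
-- first loop of A: split the 'Source' of one mount on '/' and delete a leading empty component
-- (x['Source'] is total here via getD ""; Pre_ guarantees the key is present)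
def pvSplitSourceA (x : List (String × String)) : List String :=
  let m := (PySem.Str.split? (((PySem.Dict.mk x).get? "Source").getD "") "/").getD []
  if m.headD "x" = "" then m.drop 1 else m

-- second loop of A: for m in mount: try … except IndexError: continue
def pvLoopA : List (List String) → String
  | [] => "Unknown"
  | m :: rest =>
    match PySem.List.pyGet? m 0 with
    | none => pvLoopA rest
    | some a =>
      if a = "cluster" then
        match PySem.List.pyGet? m 1 with
        | none => pvLoopA rest
        | some b =>
          if b = "data" ∨ b = "home" then
            match PySem.List.pyGet? m 2 with
            | none => pvLoopA rest
            | some c => c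
          else pvLoopA rest
      else pvLoopA rest

def get_user (mounts : List (List (String × String))) : String :=
  pvLoopA (mounts.map pvSplitSourceA)

-- ===== PORT B =====
def get_user_alt : List (List (String × String)) → String
  | [] => "Unknown"
  | x :: rest =>
    let s0 := ((PySem.Dict.mk x).get? "Source").getD ""
    let s := if PySem.Str.startswith s0 "/" then PySem.Str.slice s0 (some 1) none else s0
    if PySem.Str.startswith s "cluster/data/" || PySem.Str.startswith s "cluster/home/" then
      let r := PySem.Str.slice s (some 13) none
      let i := PySem.Str.find r "/"
      if i < 0 then r else PySem.Str.slice r none (some i)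
    else get_user_alt rest

-- ===== PRECONDITION & SPEC =====
-- Pre_ excludes mounts in which some entry has no 'Source' key: there Python A raises KeyError
-- (and B raises the same KeyError).
def Pre_get_user (mounts : List (List (String × String))) : Prop :=
  (mounts.all (fun x => ((PySem.Dict.mk x).get? "Source").isSome)) = true
instance (mounts : List (List (String × String))) : Decidable (Pre_get_user mounts) := by
  unfold Pre_get_user; infer_instance

def pvWitness_get_user : (List (List (String × String))) :=
  [[("Source", "/cluster/home/alice"), ("Destination", "/home/alice")]]

def Spec_get_user (mounts : List (List (String × String))) (out : String) : Prop := out = get_user_alt mounts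
instance (mounts : List (List (String × String))) (out : String) : Decidable (Spec_get_user mounts out) := by unfold Spec_get_user; infer_instance

-- ===== CLAIM (what is proved, stated in full; the proofs are below) =====
def Claim_equal_get_user : Prop := ∀ (mounts : List (List (String × String))), Dom_get_user mounts → Pre_get_user mounts → Spec_get_user mounts (get_user mounts)

-- ===== LEMMAS AND PROOFS =====

-- structural form of Python's str.split('/') (single-character separator)
def pvSplit : List Char → List (List Char)
  | [] => [[]]
  | c :: cs => if c = '/' then [] :: pvSplit cs else (pvSplit cs).modifyHead (c :: ·)

theorem pvSplit_ne_nil (l : List Char) : pvSplit l ≠ [] := by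
  induction l with
  | nil => simp [pvSplit]
  | cons c cs ih =>
    simp only [pvSplit]
    split
    · simp
    · cases h : pvSplit cs with
      | nil => exact absurd h ih
      | cons a t => simp

theorem pvGo_eq (l : List Char) : ∀ (fuel : Nat) (cur : List Char) (acc : List (List Char)),
    l.length ≤ fuel →
    PySem.Chars.splitOn.go ['/'] (fuel + 1) l cur acc
      = acc.reverse ++ (pvSplit l).modifyHead (cur.reverse ++ ·) := by
  induction l with
  | nil => intro fuel cur acc _; simp [PySem.Chars.splitOn.go, pvSplit]
  | cons c cs ih =>
    intro fuel cur acc h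
    simp only [List.length_cons] at h
    obtain ⟨f, rfl⟩ : ∃ f, fuel = f + 1 := ⟨fuel - 1, by omega⟩
    by_cases hc : c = '/'
    · subst hc
      have : PySem.Chars.splitOn.go ['/'] (f + 1 + 1) ('/' :: cs) cur acc
          = PySem.Chars.splitOn.go ['/'] (f + 1) cs [] (cur.reverse :: acc) := by
        simp [PySem.Chars.splitOn.go, List.isPrefixOf]
      rw [this, ih f [] (cur.reverse :: acc) (by omega)]
      cases hcs : pvSplit cs <;> simp [pvSplit, hcs]
    · have : PySem.Chars.splitOn.go ['/'] (f + 1 + 1) (c :: cs) cur acc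
          = PySem.Chars.splitOn.go ['/'] (f + 1) cs (c :: cur) acc := by
        simp [PySem.Chars.splitOn.go, List.isPrefixOf, hc, Ne.symm hc]
      rw [this, ih f (c :: cur) acc (by omega)]
      simp [pvSplit, hc]
      cases hs : pvSplit cs with
      | nil => exact absurd hs (pvSplit_ne_nil cs)
      | cons a t => simp

theorem pvSplitOn_eq (l : List Char) : PySem.Chars.splitOn l ['/'] = pvSplit l := by
  have := pvGo_eq l l.length [] [] (le_refl _)
  simp only [PySem.Chars.splitOn]
  rw [this]
  cases h : pvSplit l with
  | nil => exact absurd h (pvSplit_ne_nil l)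
  | cons a t => simp

-- first chunk is the take-up-to-the-first-slash
theorem pvSplit_head (l : List Char) : ∃ t, pvSplit l = l.takeWhile (· ≠ '/') :: t := by
  induction l with
  | nil => exact ⟨[], rfl⟩
  | cons c cs ih =>
    by_cases hc : c = '/'
    · subst hc; exact ⟨pvSplit cs, by simp [pvSplit, List.takeWhile]⟩
    · obtain ⟨t, ht⟩ := ih
      exact ⟨t, by simp [pvSplit, hc, ht, List.takeWhile]⟩

theorem pvSplit_word (w : List Char) (hw : '/' ∉ w) (t : List Char) :
    pvSplit (w ++ '/' :: t) = w :: pvSplit t := by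
  induction w with
  | nil => simp [pvSplit]
  | cons c cs ih =>
    simp only [List.mem_cons, not_or] at hw
    simp [pvSplit, Ne.symm hw.1, hw.1, ih hw.2]

-- inversion: a first chunk came from an actual leading segment of the string
theorem pvSplit_inv : ∀ (M a : List Char) (l : List (List Char)), pvSplit M = a :: l →
    '/' ∉ a ∧ ((l = [] ∧ M = a) ∨ ∃ M₁, M = a ++ '/' :: M₁ ∧ pvSplit M₁ = l) := by
  intro M
  induction M with
  | nil =>
    intro a l h
    simp only [pvSplit] at h
    injection h with h1 h2
    subst h1; subst h2
    simp
  | cons c cs ih =>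
    intro a l h
    by_cases hc : c = '/'
    · subst hc
      simp only [pvSplit, if_pos rfl] at h
      injection h with h1 h2
      subst h1; subst h2
      exact ⟨by simp, Or.inr ⟨cs, by simp, rfl⟩⟩
    · simp only [pvSplit, if_neg hc] at h
      cases hs : pvSplit cs with
      | nil => exact absurd hs (pvSplit_ne_nil cs)
      | cons a' l' =>
        rw [hs] at h
        simp only [List.modifyHead] at h
        injection h with h1 h2
        subst h1; subst h2
        obtain ⟨hna, hrest⟩ := ih a' l' hs
        refine ⟨by simp [hna]; exact Ne.symm hc, ?_⟩
        rcases hrest with ⟨rfl, rfl⟩ | ⟨M₁, rfl, hM₁⟩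
        · exact Or.inl ⟨rfl, rfl⟩
        · exact Or.inr ⟨M₁, by simp, hM₁⟩

-- char-level cores of the two per-element computations
def pvCoreA (M : List Char) : Option (List Char) :=
  match pvSplit M with
  | a :: b :: c :: _ =>
    if a = "cluster".toList ∧ (b = "data".toList ∨ b = "home".toList) then some c else none
  | _ => none

def pvExtract (R : List Char) : List Char :=
  if PySem.Chars.find R ['/'] < 0 then R else R.take (PySem.Chars.find R ['/']).toNat

def pvCoreB (M : List Char) : Option (List Char) :=
  if "cluster/data/".toList <+: M ∨ "cluster/home/".toList <+: M then
    some (pvExtract (M.drop 13))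
  else none

theorem pv_singleton_prefix (c : Char) (l : List Char) : [c] <+: l ↔ ∃ t, l = c :: t := by
  cases l with
  | nil => simp
  | cons d t =>
    constructor
    · rintro ⟨u, hu⟩; simp at hu; exact ⟨t, by simp [hu.1]⟩
    · rintro ⟨u, hu⟩; simp at hu; exact ⟨t, by simp [hu.1]⟩

theorem pv_take_eq_takeWhile (n : Nat) : ∀ (R : List Char),
    (∀ i < n, R[i]? ≠ some '/') → R[n]? = some '/' →
    R.take n = R.takeWhile (· ≠ '/') := by
  induction n with
  | zero =>
    intro R _ h2
    cases R with
    | nil => simp at h2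
    | cons c t => simp at h2; simp [h2, List.takeWhile]
  | succ n ih =>
    intro R h1 h2
    cases R with
    | nil => simp at h2
    | cons c t =>
      have hc : c ≠ '/' := by have := h1 0 (by omega); simpa using this
      simp only [List.take_succ_cons, List.takeWhile]
      rw [ih t (fun i hi => by have := h1 (i + 1) (by omega); simpa using this) (by simpa using h2)]
      simp [hc]

theorem pvExtract_eq (R : List Char) : pvExtract R = R.takeWhile (· ≠ '/') := by
  unfold pvExtract
  by_cases h : PySem.Chars.find R ['/'] < 0
  · have h1 : PySem.Chars.find R ['/'] = -1 := by
      have := PySem.Chars.neg_one_le_find R ['/']; omega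
    have h2 : ¬ ['/'] <:+: R := (PySem.Chars.find_eq_neg_one_iff R ['/']).mp h1
    have h3 : '/' ∉ R := fun hm => h2 ((List.singleton_infix_iff '/' R).mpr hm)
    rw [if_pos h, List.takeWhile_eq_self_iff.mpr (fun c hc => by
      simp only [decide_eq_true_eq]; exact fun he => h3 (he ▸ hc))]
  · rw [if_neg h]
    have h0 : 0 ≤ PySem.Chars.find R ['/'] := by omega
    obtain ⟨hpre, hmin⟩ := PySem.Chars.find_spec h0
    set n := (PySem.Chars.find R ['/']).toNat with hn
    have h2 : R[n]? = some '/' := by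
      obtain ⟨t, ht⟩ := (pv_singleton_prefix '/' (R.drop n)).mp hpre
      rw [← List.head?_drop, ht]; rfl
    refine pv_take_eq_takeWhile n R (fun i hi he => ?_) h2
    refine hmin i hi ((pv_singleton_prefix '/' (R.drop i)).mpr ?_)
    rw [← List.head?_drop] at he
    cases hd : R.drop i with
    | nil => rw [hd] at he; simp at he
    | cons d t => rw [hd] at he; simp at he; exact ⟨t, by simp [he]⟩

-- the crux: the two char-level cores agree
theorem pvCore_eq (M : List Char) : pvCoreA M = pvCoreB M := by
  by_cases hp : "cluster/data/".toList <+: M ∨ "cluster/home/".toList <+: M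
  · rcases hp with ⟨R, rfl⟩ | ⟨R, rfl⟩
    · have hM : "cluster/data/".toList ++ R
          = "cluster".toList ++ '/' :: ("data".toList ++ '/' :: R) := by
        have h0 : "cluster/data/".toList
            = "cluster".toList ++ '/' :: ("data".toList ++ ['/']) := by decide
        rw [h0]; simp
      have hmid : pvSplit ("cluster/data/".toList ++ R)
          = "cluster".toList :: "data".toList :: pvSplit R := by
        rw [hM, pvSplit_word "cluster".toList (by decide),
            pvSplit_word "data".toList (by decide)]
      have hdrop : ("cluster/data/".toList ++ R).drop 13 = R := by
        have hlen : ("cluster/data/".toList).length = 13 := by decide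
        rw [← hlen, List.drop_left]
      obtain ⟨t, ht⟩ := pvSplit_head R
      unfold pvCoreA pvCoreB
      rw [hmid, ht, hdrop, pvExtract_eq]
      simp [List.prefix_append]
    · have hM : "cluster/home/".toList ++ R
          = "cluster".toList ++ '/' :: ("home".toList ++ '/' :: R) := by
        have h0 : "cluster/home/".toList
            = "cluster".toList ++ '/' :: ("home".toList ++ ['/']) := by decide
        rw [h0]; simp
      have hmid : pvSplit ("cluster/home/".toList ++ R)
          = "cluster".toList :: "home".toList :: pvSplit R := by
        rw [hM, pvSplit_word "cluster".toList (by decide),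
            pvSplit_word "home".toList (by decide)]
      have hdrop : ("cluster/home/".toList ++ R).drop 13 = R := by
        have hlen : ("cluster/home/".toList).length = 13 := by decide
        rw [← hlen, List.drop_left]
      obtain ⟨t, ht⟩ := pvSplit_head R
      unfold pvCoreA pvCoreB
      rw [hmid, ht, hdrop, pvExtract_eq]
      simp [List.prefix_append]
  · unfold pvCoreB
    rw [if_neg hp]
    unfold pvCoreA
    cases hs : pvSplit M with
    | nil => rfl
    | cons a l =>
      cases l with
      | nil => rfl
      | cons b l2 =>
        cases l2 with
        | nil => rfl
        | cons c t =>
          show (if a = "cluster".toList ∧ (b = "data".toList ∨ b = "home".toList)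
                then some c else none) = none
          by_cases hcond : a = "cluster".toList ∧ (b = "data".toList ∨ b = "home".toList)
          case neg => rw [if_neg hcond]
          case pos =>
            rw [if_pos hcond]
            exfalso
            obtain ⟨ha, hb⟩ := hcond
            obtain ⟨_, h1⟩ := pvSplit_inv M a (b :: c :: t) hs
            rcases h1 with ⟨h, _⟩ | ⟨M₁, rfl, hM₁⟩
            · simp at h
            · obtain ⟨_, h2⟩ := pvSplit_inv M₁ b (c :: t) hM₁
              rcases h2 with ⟨h, _⟩ | ⟨M₂, rfl, _⟩
              · simp at h
              · apply hp
                subst ha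
                rcases hb with rfl | rfl
                · left
                  refine ⟨M₂, ?_⟩
                  have h0 : "cluster/data/".toList
                      = "cluster".toList ++ '/' :: ("data".toList ++ ['/']) := by decide
                  rw [h0]; simp
                · right
                  refine ⟨M₂, ?_⟩
                  have h0 : "cluster/home/".toList
                      = "cluster".toList ++ '/' :: ("home".toList ++ ['/']) := by decide
                  rw [h0]; simp

-- per-element step functions of the two loops
def pvStepA (m : List String) : Option String :=
  match PySem.List.pyGet? m 0 with
  | none => none
  | some a =>
    if a = "cluster" then
      match PySem.List.pyGet? m 1 with
      | none => none
      | some b => if b = "data" ∨ b = "home" then PySem.List.pyGet? m 2 else none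
    else none

def pvStepB (x : List (String × String)) : Option String :=
  let s0 := ((PySem.Dict.mk x).get? "Source").getD ""
  let s := if PySem.Str.startswith s0 "/" then PySem.Str.slice s0 (some 1) none else s0
  if PySem.Str.startswith s "cluster/data/" || PySem.Str.startswith s "cluster/home/" then
    let r := PySem.Str.slice s (some 13) none
    let i := PySem.Str.find r "/"
    some (if i < 0 then r else PySem.Str.slice r none (some i))
  else none

theorem pvPg0 {α : Type} (xs : List α) : PySem.List.pyGet? xs 0 = xs[0]? := by
  simpa using PySem.List.pyGet?_natCast xs 0
theorem pvPg1 {α : Type} (xs : List α) : PySem.List.pyGet? xs 1 = xs[1]? := by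
  simpa using PySem.List.pyGet?_natCast xs 1
theorem pvPg2 {α : Type} (xs : List α) : PySem.List.pyGet? xs 2 = xs[2]? := by
  simpa using PySem.List.pyGet?_natCast xs 2

theorem pvLoopA_cons (m : List String) (rest : List (List String)) :
    pvLoopA (m :: rest) = (pvStepA m).getD (pvLoopA rest) := by
  rw [pvLoopA]
  unfold pvStepA
  cases hg0 : PySem.List.pyGet? m 0 with
  | none => simp
  | some a =>
    by_cases ha : a = "cluster"
    · cases hg1 : PySem.List.pyGet? m 1 with
      | none => simp [ha]
      | some b =>
        by_cases hb : b = "data" ∨ b = "home"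
        · cases hg2 : PySem.List.pyGet? m 2 with
          | none => simp [ha, hb]
          | some c => simp [ha, hb]
        · simp [ha, hb]
    · simp [ha]

theorem pvAlt_cons (x : List (String × String)) (rest : List (List (String × String))) :
    get_user_alt (x :: rest) = (pvStepB x).getD (get_user_alt rest) := by
  simp only [get_user_alt, pvStepB]
  split_ifs <;> simp

-- the leading-'/' trim, shared shape of both per-element reductions
def pvTrim (L : List Char) : List Char := if L.headD 'x' = '/' then L.drop 1 else L

theorem pvSplitStr (s : String) :
    (PySem.Str.split? s "/").getD [] = (pvSplit s.toList).map String.ofList := by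
  have h := PySem.Str.split?_map s "/"
  have h1 : ("/" : String).toList = ['/'] := by decide
  rw [h1] at h
  simp only [PySem.Chars.split?, List.isEmpty_cons, ite_false, Bool.false_eq_true] at h
  rw [pvSplitOn_eq] at h
  cases hs : PySem.Str.split? s "/" with
  | none => rw [hs] at h; simp at h
  | some m =>
    rw [hs] at h
    simp only [Option.map_some, Option.some.injEq] at h
    simp only [hs, Option.getD_some]
    have : (m.map String.toList).map String.ofList = (pvSplit s.toList).map String.ofList := by
      rw [h]
    simpa [List.map_map, Function.comp_def, String.ofList_toList] using this

-- A's per-element computation, reduced to the char-level core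
theorem pvStepA_core (M : List Char) :
    pvStepA ((pvSplit M).map String.ofList) = (pvCoreA M).map String.ofList := by
  have hcl : "cluster".toList = ['c','l','u','s','t','e','r'] := by decide
  have hdl : "data".toList = ['d','a','t','a'] := by decide
  have hhl : "home".toList = ['h','o','m','e'] := by decide
  unfold pvStepA pvCoreA
  cases hs : pvSplit M with
  | nil => exact absurd hs (pvSplit_ne_nil M)
  | cons a l =>
    cases l with
    | nil =>
      simp only [List.map_cons, List.map_nil, pvPg0, pvPg1]
      by_cases ha : String.ofList a = "cluster" <;> simp [ha]
    | cons b l2 =>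
      have key : ∀ (rest : List (List Char)),
          (if String.ofList a = "cluster" then
            if String.ofList b = "data" ∨ String.ofList b = "home" then
              ((a :: b :: rest).map String.ofList)[2]? else none
          else none)
          = (if a = "cluster".toList ∧ (b = "data".toList ∨ b = "home".toList) then
              (rest.map String.ofList)[0]? else none) := by
        intro rest
        by_cases ha : a = "cluster".toList
        · subst ha
          by_cases hb : b = "data".toList ∨ b = "home".toList
          · rcases hb with rfl | rfl <;>
              simp [String.ofList_toList, hcl, hdl, hhl]
          · rw [if_pos (by simp [String.ofList_toList]), if_neg ?hb1, if_neg ?hb2]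
            case hb1 => simp only [String.ofList_eq]; exact hb
            case hb2 => intro hand; exact hb hand.2
        · rw [if_neg ?ha1, if_neg ?ha2]
          case ha1 => simp only [String.ofList_eq]; exact ha
          case ha2 => simp only [not_and]; intro h; exact absurd h ha
      cases l2 with
      | nil =>
        simp only [List.map_cons, List.map_nil, pvPg0, pvPg1, pvPg2]
        have := key []
        simp only [List.map_cons, List.map_nil] at this
        simpa using this
      | cons c t =>
        simp only [List.map_cons, pvPg0, pvPg1, pvPg2]
        have := key (c :: t)
        simp only [List.map_cons] at this
        simpa using this

theorem pvStepA_eq (x : List (String × String)) :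
    pvStepA (pvSplitSourceA x)
      = (pvCoreA (pvTrim (((PySem.Dict.mk x).get? "Source").getD "").toList)).map String.ofList := by
  unfold pvSplitSourceA
  generalize ((PySem.Dict.mk x).get? "Source").getD "" = s
  rw [pvSplitStr]
  unfold pvTrim
  cases hL : s.toList with
  | nil =>
    simp [pvSplit, pvCoreA]
    rfl
  | cons c T =>
    by_cases hc : c = '/'
    · subst hc
      have h1 : pvSplit ('/' :: T) = [] :: pvSplit T := by simp [pvSplit]
      rw [h1]
      simp only [List.map_cons, List.headD_cons, List.headD_cons]
      rw [if_pos (by simp), if_pos (by simp)]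
      simpa using pvStepA_core T
    · have h1 : pvSplit (c :: T) = (pvSplit T).modifyHead (c :: ·) := by simp [pvSplit, hc]
      cases hT : pvSplit T with
      | nil => exact absurd hT (pvSplit_ne_nil T)
      | cons w t =>
        rw [h1, hT]
        simp only [List.modifyHead, List.map_cons, List.headD_cons]
        rw [if_neg (by simp), if_neg (by simp [hc])]
        have := pvStepA_core (c :: T)
        rw [pvSplit, if_neg hc, hT] at this
        simpa using this

-- B's per-element computation, reduced to the char-level core
theorem pvStepB_eq (x : List (String × String)) :
    pvStepB x
      = (pvCoreB (pvTrim (((PySem.Dict.mk x).get? "Source").getD "").toList)).map String.ofList := by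
  unfold pvStepB
  generalize ((PySem.Dict.mk x).get? "Source").getD "" = s0
  have h1 : ("/" : String).toList = ['/'] := by decide
  simp only []
  generalize hg : (if PySem.Str.startswith s0 "/" = true
      then PySem.Str.slice s0 (some 1) none else s0) = s
  have hs : s.toList = pvTrim s0.toList := by
    rw [← hg]
    unfold pvTrim
    by_cases hsw : PySem.Str.startswith s0 "/" = true
    · rw [if_pos hsw]
      have hpre : ['/'] <+: s0.toList := by
        rw [PySem.Str.startswith_eq, h1] at hsw
        exact (PySem.Chars.startswith_iff s0.toList ['/']).mp hsw
      obtain ⟨T, hT⟩ := hpre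
      rw [if_pos (by rw [← hT]; simp)]
      rw [PySem.Str.toList_slice, PySem.Chars.slice_eq_listSlice, PySem.List.slice_from_one, ← hT]
      simp
    · rw [if_neg hsw]
      rw [if_neg ?hne]
      case hne =>
        intro hh
        apply hsw
        rw [PySem.Str.startswith_eq, h1]
        apply (PySem.Chars.startswith_iff s0.toList ['/']).mpr
        cases hL : s0.toList with
        | nil => rw [hL] at hh; simp at hh
        | cons c T => rw [hL] at hh; simp at hh; exact ⟨T, by simp [hh]⟩
  have hcond : (PySem.Str.startswith s "cluster/data/" || PySem.Str.startswith s "cluster/home/") = true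
      ↔ ("cluster/data/".toList <+: pvTrim s0.toList ∨ "cluster/home/".toList <+: pvTrim s0.toList) := by
    simp only [Bool.or_eq_true, PySem.Str.startswith_eq, PySem.Chars.startswith_iff, hs]
  by_cases hc : ("cluster/data/".toList <+: pvTrim s0.toList ∨ "cluster/home/".toList <+: pvTrim s0.toList)
  · rw [if_pos (hcond.mpr hc)]
    unfold pvCoreB
    rw [if_pos hc]
    simp only [Option.map_some, Option.some.injEq]
    have hr : (PySem.Str.slice s (some 13) none).toList = (pvTrim s0.toList).drop 13 := by
      rw [PySem.Str.toList_slice, PySem.Chars.slice_eq_listSlice,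
          PySem.List.slice_from _ (by norm_num : (0:Int) ≤ 13), hs]
      rfl
    have hfind : PySem.Str.find (PySem.Str.slice s (some 13) none) "/"
        = PySem.Chars.find ((pvTrim s0.toList).drop 13) ['/'] := by
      rw [PySem.Str.find_eq, hr, h1]
    rw [hfind]
    unfold pvExtract
    by_cases hneg : PySem.Chars.find ((pvTrim s0.toList).drop 13) ['/'] < 0
    · rw [if_pos hneg, if_pos hneg, eq_comm, String.ofList_eq, hr]
    · rw [if_neg hneg, if_neg hneg, eq_comm, String.ofList_eq,
          PySem.Str.toList_slice, PySem.Chars.slice_eq_listSlice,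
          PySem.List.slice_to _ (by omega), hr]
  · rw [if_neg (by rw [hcond]; exact hc)]
    unfold pvCoreB
    rw [if_neg hc]
    rfl

theorem pv_loop_eq : ∀ (mounts : List (List (String × String))),
    pvLoopA (mounts.map pvSplitSourceA) = get_user_alt mounts := by
  intro mounts
  induction mounts with
  | nil => rfl
  | cons x rest ih =>
    show pvLoopA (pvSplitSourceA x :: rest.map pvSplitSourceA) = get_user_alt (x :: rest)
    rw [pvLoopA_cons, pvAlt_cons, ih, pvStepA_eq, pvStepB_eq, pvCore_eq]

-- ===== VERDICT (by name: the statement is the Claim_ definition above) =====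
theorem get_user_spec : Claim_equal_get_user := by
  intro mounts _ _
  show get_user mounts = get_user_alt mounts
  rw [get_user, pv_loop_eq]
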